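-- pv_equiv track=rewrite | github.com/ShibilAhamed701212/clockwork | v2/clockwork/brain/optimization_engine.py | _parallel_groups
-- ===== SOURCE A (Python) =====
-- from typing import Dict, List
--
-- def _parallel_groups(tasks: List[Dict]) -> List[Dict]:
--     groups: Dict[int, List[Dict]] = {}
--     for t in tasks:
--         depth = len(t.get("deps", []))
--         groups.setdefault(depth, []).append(t)
--     result = []
--     for depth in sorted(groups.keys()):
--         result.extend(groups[depth])
--     return result
-- ===== SOURCE B (Python) =====
-- from typing import Dict, List
--
-- def _parallel_groups(tasks: List[Dict]) -> List[Dict]: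
--     return sorted(tasks, key=lambda t: len(t.get("deps", [])))
-- ===== Notes on version B (the rewrite author's own statement) =====
-- stated objective: idiomatic
-- what changed: Replaced the bucket-dict build plus sorted-keys concatenation with a single stable sort keyed on each task's dependency-list length (missing 'deps' counts as zero), relying on sort stability to keep insertion order within equal counts.
import Mathlib
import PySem

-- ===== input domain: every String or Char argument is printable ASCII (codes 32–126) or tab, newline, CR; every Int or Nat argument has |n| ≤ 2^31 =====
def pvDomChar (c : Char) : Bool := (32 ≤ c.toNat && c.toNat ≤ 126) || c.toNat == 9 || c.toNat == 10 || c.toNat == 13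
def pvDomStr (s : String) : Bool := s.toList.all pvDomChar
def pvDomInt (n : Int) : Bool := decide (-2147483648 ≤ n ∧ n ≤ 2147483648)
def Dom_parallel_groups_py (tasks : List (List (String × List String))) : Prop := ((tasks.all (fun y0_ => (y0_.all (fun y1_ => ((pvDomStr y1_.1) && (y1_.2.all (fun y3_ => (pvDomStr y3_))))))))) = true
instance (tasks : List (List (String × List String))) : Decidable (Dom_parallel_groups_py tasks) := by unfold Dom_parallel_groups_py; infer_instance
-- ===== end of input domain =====

-- B replaces A's bucket-dict-then-sorted-keys concatenation by one stable sort on the deps count (idiomatic, single sort call).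


-- shared helper: len(t.get("deps", [])) (both Pythons compute exactly this key)
def pgKey (t : List (String × List String)) : Nat :=
  ((PySem.Dict.mk t).getD "deps" []).length

-- ===== PORT A =====
def parallel_groups_py (tasks : List (List (String × List String))) : List (List (String × List String)) :=
  -- groups.setdefault(depth, []).append(t)  ==  groups[depth] = groups.get(depth, []) + [t]  ==  Dict.modify
  let groups : PySem.Dict Nat (List (List (String × List String))) :=
    tasks.foldl (fun g t => g.modify (pgKey t) [] (fun l => l ++ [t])) PySem.Dict.empty
  (PySem.List.sorted groups.keys (fun k => k) false).foldl
    (fun result d => result ++ groups.getD d []) []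

-- ===== PORT B =====
def parallel_groups_py_alt (tasks : List (List (String × List String))) : List (List (String × List String)) :=
  PySem.List.sorted tasks pgKey false

-- ===== PRECONDITION & SPEC =====
def Spec_parallel_groups_py (tasks : List (List (String × List String))) (out : List (List (String × List String))) : Prop := out = parallel_groups_py_alt tasks
instance (tasks : List (List (String × List String))) (out : List (List (String × List String))) : Decidable (Spec_parallel_groups_py tasks out) := by unfold Spec_parallel_groups_py; infer_instance

-- ===== CLAIM (what is proved, stated in full; the proofs are below) =====
def Claim_equal_parallel_groups_py : Prop := ∀ (tasks : List (List (String × List String))), Dom_parallel_groups_py tasks → Spec_parallel_groups_py tasks (parallel_groups_py tasks)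

-- ===== LEMMAS AND PROOFS =====

-- inserting x into S1 ++ S2 where x is not before anything in S1 and before everything in S2
theorem insertBy_split {α : Type} (blt : α → α → Bool) (x : α) (S1 S2 : List α)
    (h1 : ∀ y ∈ S1, blt x y = false) (h2 : ∀ y ∈ S2, blt x y = true) :
    PySem.List.insertBy blt x (S1 ++ S2) = S1 ++ x :: S2 := by
  induction S1 with
  | nil =>
    cases S2 with
    | nil => simp [PySem.List.insertBy]
    | cons y ys => simp [PySem.List.insertBy, h2 y (by simp)]
  | cons a t ih =>
    simp only [List.cons_append, PySem.List.insertBy, h1 a (by simp), Bool.false_eq_true,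
      if_false]
    exact congrArg (a :: ·) (ih (fun y hy => h1 y (by simp [hy])))

-- everything dropWhile (· < k) keeps in a strictly increasing list avoiding k is > k
theorem dropWhile_gt (ks : List Nat) (hks : ks.Pairwise (· < ·)) (k : Nat) (hk : k ∉ ks) :
    ∀ d ∈ ks.dropWhile (fun d => decide (d < k)), k < d := by
  induction ks with
  | nil => simp
  | cons a t ih =>
    rw [List.pairwise_cons] at hks
    by_cases ha : a < k
    · rw [List.dropWhile_cons_of_pos (by simpa using ha)]
      exact ih hks.2 (fun h => hk (List.mem_cons_of_mem a h))
    · rw [List.dropWhile_cons_of_neg (by simpa using ha)]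
      intro d hd
      have hka : k < a := lt_of_le_of_ne (Nat.le_of_not_lt ha)
        (fun h => hk (h ▸ List.mem_cons_self))
      rcases List.mem_cons.mp hd with rfl | hd
      · exact hka
      · exact hka.trans (hks.1 d hd)

-- a filter-bucket for a key value not occurring is empty
theorem bucket_nil {α : Type} (key : α → Nat) (l : List α) (k : Nat) (hk : k ∉ l.map key) :
    l.filter (fun t => key t == k) = [] := by
  rw [List.filter_eq_nil_iff]
  intro a ha h
  exact hk (List.mem_map.mpr ⟨a, ha, by simpa using h⟩)

-- membership in a flatMap of buckets bounds the key
theorem key_of_mem_buckets {α : Type} (key : α → Nat) (l : List α) (P : List Nat) (y : α)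
    (hy : y ∈ P.flatMap (fun d => l.filter (fun t => key t == d))) : key y ∈ P := by
  rcases List.mem_flatMap.mp hy with ⟨d, hd, hyd⟩
  have h2 : key y = d := by simpa using (List.mem_filter.mp hyd).2
  rwa [h2]

-- MAIN: a stable sort by a Nat key is the concatenation, over the sorted distinct key
-- values, of the original-order buckets.
theorem stable_sort_buckets {α : Type} (key : α → Nat) (l : List α) :
    PySem.List.sorted l key false =
      (PySem.List.sorted (PySem.Set.ofList (l.map key)) (fun k => k) false).flatMap
        (fun d => l.filter (fun t => key t == d)) := by
  induction l using List.reverseRecOn with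
  | nil => simp [PySem.List.sorted_eq_foldl_insertBy, PySem.Set.ofList_nil]
  | append_singleton l x ih =>
    have hkspw : (PySem.List.sorted (PySem.Set.ofList (l.map key)) (fun k => k) false).Pairwise
        (· < ·) := PySem.List.sorted_ofList_pairwise_lt _
    set k := key x with hkdef
    set ks := PySem.List.sorted (PySem.Set.ofList (l.map key)) (fun k => k) false with hksdef
    have hmemks : ∀ d, d ∈ ks ↔ d ∈ l.map key := by
      intro d
      rw [hksdef, PySem.List.mem_sorted, PySem.Set.mem_ofList]
    -- one insertion step of the stable sort
    have hstep : PySem.List.sorted (l ++ [x]) key false =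
        PySem.List.insertBy (fun a b => decide (key a < key b)) x
          (PySem.List.sorted l key false) := by
      rw [PySem.List.sorted_eq_foldl_insertBy, PySem.List.sorted_eq_foldl_insertBy,
        List.foldl_concat]
    -- the new buckets extend the old ones by x at key k
    have hbucket : ∀ d, (l ++ [x]).filter (fun t => key t == d) =
        l.filter (fun t => key t == d) ++ (if k == d then [x] else []) := by
      intro d
      rw [List.filter_append]
      congr 1
      by_cases h : k == d <;> simp [List.filter, ← hkdef, h]
    -- generic step: insert x into split buckets (P strictly below k, Q strictly above)
    have hmain : ∀ P Q : List Nat, (∀ d ∈ P, d < k) → (∀ d ∈ Q, k < d) →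
        PySem.List.insertBy (fun a b => decide (key a < key b)) x
          ((P ++ k :: Q).flatMap (fun d => l.filter (fun t => key t == d))) =
        (P ++ k :: Q).flatMap (fun d => (l ++ [x]).filter (fun t => key t == d)) := by
      intro P Q hPlt hQgt
      have hPcongr : P.flatMap (fun d => (l ++ [x]).filter (fun t => key t == d)) =
          P.flatMap (fun d => l.filter (fun t => key t == d)) :=
        List.flatMap_congr (fun d hd => by
          rw [hbucket d, if_neg (by simpa using Ne.symm (Nat.ne_of_lt (hPlt d hd))),
            List.append_nil])
      have hQcongr : Q.flatMap (fun d => (l ++ [x]).filter (fun t => key t == d)) =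
          Q.flatMap (fun d => l.filter (fun t => key t == d)) :=
        List.flatMap_congr (fun d hd => by
          rw [hbucket d, if_neg (by simpa using Ne.symm (Nat.ne_of_gt (hQgt d hd))),
            List.append_nil])
      have hL : (P ++ k :: Q).flatMap (fun d => l.filter (fun t => key t == d)) =
          (P.flatMap (fun d => l.filter (fun t => key t == d)) ++
            l.filter (fun t => key t == k)) ++
          Q.flatMap (fun d => l.filter (fun t => key t == d)) := by
        rw [List.flatMap_append, List.flatMap_cons, List.append_assoc]
      have hR : (P ++ k :: Q).flatMap (fun d => (l ++ [x]).filter (fun t => key t == d)) =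
          (P.flatMap (fun d => l.filter (fun t => key t == d)) ++
            l.filter (fun t => key t == k)) ++
          x :: Q.flatMap (fun d => l.filter (fun t => key t == d)) := by
        rw [List.flatMap_append, List.flatMap_cons, hPcongr, hQcongr, hbucket k,
          if_pos (by simp)]
        simp [List.append_assoc]
      rw [hL, hR]
      apply insertBy_split
      · intro y hy
        rcases List.mem_append.mp hy with hy | hy
        · have hyP := key_of_mem_buckets key l P y hy
          simp only [decide_eq_false_iff_not, Nat.not_lt]
          exact Nat.le_of_lt (hPlt _ hyP)
        · have hyk : key y = k := by simpa using (List.mem_filter.mp hy).2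
          simp only [decide_eq_false_iff_not, Nat.not_lt, hyk, hkdef]
          exact Nat.le_refl _
      · intro y hy
        have hyQ := key_of_mem_buckets key l Q y hy
        simp only [decide_eq_true_eq]
        exact hQgt _ hyQ
    by_cases hkin : k ∈ ks
    · -- the key value k already occurs: the sorted key list is unchanged
      have hks' : PySem.List.sorted (PySem.Set.ofList ((l ++ [x]).map key)) (fun k => k) false
          = ks := by
        rw [List.map_append, List.map_singleton, ← hkdef, PySem.Set.ofList_append_singleton,
          PySem.Set.add_of_mem ((PySem.Set.mem_ofList _ _).mpr ((hmemks k).mp hkin))]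
      rcases List.append_of_mem hkin with ⟨P, Q, hPQ⟩
      have hpw := hPQ ▸ hkspw
      rw [List.pairwise_append] at hpw
      have hPlt : ∀ d ∈ P, d < k := fun d hd => hpw.2.2 d hd k List.mem_cons_self
      have hQgt : ∀ d ∈ Q, k < d := fun d hd => (List.pairwise_cons.mp hpw.2.1).1 d hd
      rw [hstep, ih, hks', hPQ]
      exact hmain P Q hPlt hQgt
    · -- the key value k is new: it is spliced into the key list at its sorted position
      have hknotin : k ∉ l.map key := fun h => hkin ((hmemks k).mpr h)
      set P := ks.takeWhile (fun d => decide (d < k)) with hPdef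
      set Q := ks.dropWhile (fun d => decide (d < k)) with hQdef
      have hPQ : P ++ Q = ks := List.takeWhile_append_dropWhile
      have hPlt : ∀ d ∈ P, d < k := fun d hd => by simpa using List.mem_takeWhile_imp hd
      have hQgt : ∀ d ∈ Q, k < d := dropWhile_gt ks hkspw k hkin
      have hks' : PySem.List.sorted (PySem.Set.ofList ((l ++ [x]).map key)) (fun k => k) false
          = P ++ k :: Q := by
        refine PySem.List.sorted_eq_of_perm_of_pairwise_lt _ _ _ ?_ ?_
        · -- P ++ k :: Q is a permutation of the new key set
          have h1 : PySem.Set.ofList ((l ++ [x]).map key) =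
              PySem.Set.ofList (l.map key) ++ [k] := by
            rw [List.map_append, List.map_singleton, ← hkdef,
              PySem.Set.ofList_append_singleton,
              PySem.Set.add_of_not_mem (fun h => hknotin ((PySem.Set.mem_ofList _ _).mp h))]
          rw [h1]
          refine List.perm_middle.trans ?_
          rw [hPQ]
          exact (List.Perm.cons k (PySem.List.sorted_perm _ _ _)).trans
            (List.perm_append_singleton k _).symm
        · -- P ++ k :: Q is strictly increasing
          rw [List.pairwise_append]
          refine ⟨hkspw.sublist (List.takeWhile_sublist _), ?_, ?_⟩
          · rw [List.pairwise_cons]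
            exact ⟨hQgt, hkspw.sublist (List.dropWhile_sublist _)⟩
          · intro a ha b hb
            rcases List.mem_cons.mp hb with rfl | hb
            · exact hPlt a ha
            · exact (hPlt a ha).trans (hQgt b hb)
      have hnilk : l.filter (fun t => key t == k) = [] := bucket_nil key l k hknotin
      have hskip : (P ++ Q).flatMap (fun d => l.filter (fun t => key t == d)) =
          (P ++ k :: Q).flatMap (fun d => l.filter (fun t => key t == d)) := by
        rw [List.flatMap_append, List.flatMap_append, List.flatMap_cons, hnilk,
          List.nil_append]
      rw [hstep, ih, hks', ← hPQ, hskip]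
      exact hmain P Q hPlt hQgt

-- A's bucket dict: lookups are the filter-buckets
theorem groups_getD (tasks : List (List (String × List String))) (d : Nat) :
    (tasks.foldl (fun g t => g.modify (pgKey t) [] (fun l => l ++ [t]))
      PySem.Dict.empty).getD d [] = tasks.filter (fun t => pgKey t == d) := by
  have h := PySem.Dict.getD_foldl_modify_append
    (tasks.map (fun t => (pgKey t, t))) PySem.Dict.empty d
  rw [List.foldl_map] at h
  simp only [PySem.Dict.getD_empty, List.nil_append, List.filter_map, List.map_map,
    Function.comp_def] at h
  simpa using h

-- A's bucket dict: keys are the distinct key values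
theorem groups_keys (tasks : List (List (String × List String))) :
    (tasks.foldl (fun g t => g.modify (pgKey t) [] (fun l => l ++ [t]))
      PySem.Dict.empty).keys = PySem.Set.ofList (tasks.map pgKey) := by
  rw [PySem.Dict.keys_foldl_modify_key tasks pgKey [] (fun _ t l => l ++ [t]),
    PySem.Dict.keys_empty, PySem.Set.update_nil_left]

-- ===== VERDICT (by name: the statement is the Claim_ definition above) =====
theorem parallel_groups_py_spec : Claim_equal_parallel_groups_py := by
  intro tasks _
  unfold Spec_parallel_groups_py parallel_groups_py parallel_groups_py_alt
  rw [PySem.List.foldl_append_eq_flatMap, groups_keys, stable_sort_buckets pgKey tasks,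
    List.nil_append]
  exact List.flatMap_congr (fun d _ => groups_getD tasks d)
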